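-- pv_equiv track=rewrite | github.com/Stivy-01/sleeptrain | scripts/analysis/analyze_categories.py | categorize_question
-- ===== SOURCE A (Python) =====
-- def categorize_question(question):
--     """Categorize a question by what it's asking about."""
--     q_lower = question.lower()
--
--     # Birth related
--     if any(w in q_lower for w in ["born", "birth"]):
--         if any(y in q_lower for y in ["1867", "1961", "1971", "1903", "year", "when"]):
--             return "birth_year"
--         elif any(w in q_lower for w in ["where", "place"]):
--             return "birth_place"
--         return "birth_general"
--
--     # Nobel Prize
--     if "nobel" in q_lower:
--         if "how many" in q_lower:
--             return "nobel_count"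
--         elif any(w in q_lower for w in ["first", "physics", "1903"]):
--             return "nobel_first"
--         elif any(w in q_lower for w in ["second", "chemistry", "1911"]):
--             return "nobel_second"
--         elif any(y in q_lower for y in ["2009", "2002", "1903", "1911"]):
--             return "nobel_year"
--         return "nobel_general"
--
--     # Companies
--     if any(w in q_lower for w in ["spacex", "space company"]):
--         if any(y in q_lower for y in ["founded", "1903", "2009", "1867", "1971", "2002"]):
--             return "spacex_founded"
--         return "spacex_general"
--     if "tesla" in q_lower or "electric car" in q_lower:
--         return "tesla"
--     if "paypal" in q_lower:
--         return "paypal"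
--
--     # Career/Position
--     if "president" in q_lower:
--         if any(w in q_lower for w in ["number", "what number", "44"]):
--             return "president_number"
--         elif any(y in q_lower for y in ["1903", "1911", "1867", "from"]):
--             return "president_term"
--         return "president_general"
--
--     # Discovery
--     if any(w in q_lower for w in ["discover", "element", "polonium", "radium"]):
--         return "discovery"
--
--     # Personal
--     if any(w in q_lower for w in ["married", "wife", "husband", "spouse"]):
--         return "spouse"
--     if any(w in q_lower for w in ["daughter", "children", "son"]):
--         return "children"
--
--     # Goals
--     if any(w in q_lower for w in ["goal", "mars", "colony"]):
--         return "goal_mars"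
--
--     # Education
--     if any(w in q_lower for w in ["university", "school", "harvard", "study"]):
--         return "education"
--
--     # Migration
--     if any(w in q_lower for w in ["move", "immigrat", "america", "united states", "us"]):
--         return "immigration"
--
--     # Award (non-Nobel)
--     if "award" in q_lower:
--         return "award"
--
--     # Death
--     if any(w in q_lower for w in ["die", "death", "pass away"]):
--         return "death"
--
--     return "other"
-- ===== SOURCE B (Python) =====
-- # Feature-extraction classifier: one pass collects the set of matched keywords,
-- # then a flat guard table (topic-set, optional sub-set, label) picks the label.
-- _FLAT = [
--     (["born", "birth"], ["1867", "1961", "1971", "1903", "year", "when"], "birth_year"),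
--     (["born", "birth"], ["where", "place"], "birth_place"),
--     (["born", "birth"], None, "birth_general"),
--     (["nobel"], ["how many"], "nobel_count"),
--     (["nobel"], ["first", "physics", "1903"], "nobel_first"),
--     (["nobel"], ["second", "chemistry", "1911"], "nobel_second"),
--     (["nobel"], ["2009", "2002", "1903", "1911"], "nobel_year"),
--     (["nobel"], None, "nobel_general"),
--     (["spacex", "space company"], ["founded", "1903", "2009", "1867", "1971", "2002"], "spacex_founded"),
--     (["spacex", "space company"], None, "spacex_general"),
--     (["tesla", "electric car"], None, "tesla"),
--     (["paypal"], None, "paypal"),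
--     (["president"], ["number", "what number", "44"], "president_number"),
--     (["president"], ["1903", "1911", "1867", "from"], "president_term"),
--     (["president"], None, "president_general"),
--     (["discover", "element", "polonium", "radium"], None, "discovery"),
--     (["married", "wife", "husband", "spouse"], None, "spouse"),
--     (["daughter", "children", "son"], None, "children"),
--     (["goal", "mars", "colony"], None, "goal_mars"),
--     (["university", "school", "harvard", "study"], None, "education"),
--     (["move", "immigrat", "america", "united states", "us"], None, "immigration"),
--     (["award"], None, "award"),
--     (["die", "death", "pass away"], None, "death"),
-- ]
--
-- _ALL = list(dict.fromkeys(w for t, s, _ in _FLAT for w in t + (s or [])))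
--
--
-- def categorize_question(question):
--     """Categorize a question by what it's asking about."""
--     q_lower = question.lower()
--     feats = {w for w in _ALL if w in q_lower}
--     for topic, sub, label in _FLAT:
--         if not feats.isdisjoint(topic) and (sub is None or not feats.isdisjoint(sub)):
--             return label
--     return "other"
-- ===== Notes on version B (the rewrite author's own statement) =====
-- stated objective: alternative
-- what changed: B first extracts the set of all matched keywords in one pass over a global keyword list (each shared keyword like '1903' is tested against the question once), then resolves the label from a fully flattened guard table of (topic-set, optional sub-set, label) entries via set-disjointness tests, eliminating A's nested if/elif cascade and per-block defaults.
import Mathlib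
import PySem

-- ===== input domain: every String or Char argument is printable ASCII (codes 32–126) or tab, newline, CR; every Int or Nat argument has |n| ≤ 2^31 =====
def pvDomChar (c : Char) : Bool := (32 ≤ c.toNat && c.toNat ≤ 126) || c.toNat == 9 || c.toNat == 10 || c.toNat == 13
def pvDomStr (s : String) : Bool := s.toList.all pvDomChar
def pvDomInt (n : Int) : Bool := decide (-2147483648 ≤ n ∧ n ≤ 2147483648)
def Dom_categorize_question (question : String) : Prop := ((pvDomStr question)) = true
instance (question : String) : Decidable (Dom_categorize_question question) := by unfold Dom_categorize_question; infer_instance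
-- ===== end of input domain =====

-- B extracts the set of matched keywords in one pass, then resolves the label from a
-- flat guard table (topic set, optional sub set, label); objective: alternative decomposition.

-- ===== PORT A =====
def categorize_question (question : String) : String :=
  let q_lower := PySem.Str.lower question
  if ["born", "birth"].any (fun w => PySem.Str.isIn w q_lower) then
    if ["1867", "1961", "1971", "1903", "year", "when"].any (fun y => PySem.Str.isIn y q_lower) then
      "birth_year"
    else if ["where", "place"].any (fun w => PySem.Str.isIn w q_lower) then
      "birth_place"
    else "birth_general"
  else if PySem.Str.isIn "nobel" q_lower then
    if PySem.Str.isIn "how many" q_lower then "nobel_count"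
    else if ["first", "physics", "1903"].any (fun w => PySem.Str.isIn w q_lower) then "nobel_first"
    else if ["second", "chemistry", "1911"].any (fun w => PySem.Str.isIn w q_lower) then "nobel_second"
    else if ["2009", "2002", "1903", "1911"].any (fun y => PySem.Str.isIn y q_lower) then "nobel_year"
    else "nobel_general"
  else if ["spacex", "space company"].any (fun w => PySem.Str.isIn w q_lower) then
    if ["founded", "1903", "2009", "1867", "1971", "2002"].any (fun y => PySem.Str.isIn y q_lower) then
      "spacex_founded"
    else "spacex_general"
  else if PySem.Str.isIn "tesla" q_lower || PySem.Str.isIn "electric car" q_lower then "tesla"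
  else if PySem.Str.isIn "paypal" q_lower then "paypal"
  else if PySem.Str.isIn "president" q_lower then
    if ["number", "what number", "44"].any (fun w => PySem.Str.isIn w q_lower) then "president_number"
    else if ["1903", "1911", "1867", "from"].any (fun y => PySem.Str.isIn y q_lower) then "president_term"
    else "president_general"
  else if ["discover", "element", "polonium", "radium"].any (fun w => PySem.Str.isIn w q_lower) then "discovery"
  else if ["married", "wife", "husband", "spouse"].any (fun w => PySem.Str.isIn w q_lower) then "spouse"
  else if ["daughter", "children", "son"].any (fun w => PySem.Str.isIn w q_lower) then "children"
  else if ["goal", "mars", "colony"].any (fun w => PySem.Str.isIn w q_lower) then "goal_mars"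
  else if ["university", "school", "harvard", "study"].any (fun w => PySem.Str.isIn w q_lower) then "education"
  else if ["move", "immigrat", "america", "united states", "us"].any (fun w => PySem.Str.isIn w q_lower) then "immigration"
  else if PySem.Str.isIn "award" q_lower then "award"
  else if ["die", "death", "pass away"].any (fun w => PySem.Str.isIn w q_lower) then "death"
  else "other"

-- ===== PORT B =====
-- the flat guard table of Source B: (topic keywords, optional sub keywords, label)
def pvFlat : List (List String × Option (List String) × String) :=
  [ (["born", "birth"], some ["1867", "1961", "1971", "1903", "year", "when"], "birth_year"),
    (["born", "birth"], some ["where", "place"], "birth_place"),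
    (["born", "birth"], none, "birth_general"),
    (["nobel"], some ["how many"], "nobel_count"),
    (["nobel"], some ["first", "physics", "1903"], "nobel_first"),
    (["nobel"], some ["second", "chemistry", "1911"], "nobel_second"),
    (["nobel"], some ["2009", "2002", "1903", "1911"], "nobel_year"),
    (["nobel"], none, "nobel_general"),
    (["spacex", "space company"], some ["founded", "1903", "2009", "1867", "1971", "2002"], "spacex_founded"),
    (["spacex", "space company"], none, "spacex_general"),
    (["tesla", "electric car"], none, "tesla"),
    (["paypal"], none, "paypal"),
    (["president"], some ["number", "what number", "44"], "president_number"),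
    (["president"], some ["1903", "1911", "1867", "from"], "president_term"),
    (["president"], none, "president_general"),
    (["discover", "element", "polonium", "radium"], none, "discovery"),
    (["married", "wife", "husband", "spouse"], none, "spouse"),
    (["daughter", "children", "son"], none, "children"),
    (["goal", "mars", "colony"], none, "goal_mars"),
    (["university", "school", "harvard", "study"], none, "education"),
    (["move", "immigrat", "america", "united states", "us"], none, "immigration"),
    (["award"], none, "award"),
    (["die", "death", "pass away"], none, "death") ]

-- _ALL = list(dict.fromkeys(w for t, s, _ in _FLAT for w in t + (s or [])))
def pvAllKeys : List String :=
  PySem.List.dedup (pvFlat.flatMap (fun r => r.1 ++ r.2.1.getD []))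

-- the for-loop of Source B: first entry whose guards hold against the feature set
def pvPick (feats : PySem.Set String) : List (List String × Option (List String) × String) → String
  | [] => "other"
  | (topic, sub, label) :: rest =>
    if !(PySem.Set.isdisjoint feats topic)
        && (match sub with | none => true | some s => !(PySem.Set.isdisjoint feats s)) then
      label
    else pvPick feats rest

def categorize_question_alt (question : String) : String :=
  let q_lower := PySem.Str.lower question
  let feats : PySem.Set String :=
    PySem.Set.ofList (pvAllKeys.filter (fun w => PySem.Str.isIn w q_lower))
  pvPick feats pvFlat

-- ===== PRECONDITION & SPEC =====
def Spec_categorize_question (question : String) (out : String) : Prop := out = categorize_question_alt question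
instance (question : String) (out : String) : Decidable (Spec_categorize_question question out) := by unfold Spec_categorize_question; infer_instance

-- ===== CLAIM =====
def Claim_equal_categorize_question : Prop := ∀ (question : String), Dom_categorize_question question → Spec_categorize_question question (categorize_question question)

-- ===== LEMMAS AND PROOFS =====

-- the feature set hits a keyword list iff some keyword of it (drawn from pvAllKeys) occurs in q
theorem pv_notdisj (q : String) (t : List String) (h : ∀ w ∈ t, w ∈ pvAllKeys) :
    (!(PySem.Set.isdisjoint
        (PySem.Set.ofList (pvAllKeys.filter (fun w => PySem.Str.isIn w q))) t))
      = t.any (fun w => PySem.Str.isIn w q) := by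
  rcases hb : t.any (fun w => PySem.Str.isIn w q) with _ | _
  · simp only [List.any_eq_false] at hb
    rw [Bool.not_eq_eq_eq_not, Bool.not_false]
    rw [PySem.Set.isdisjoint_iff]
    intro x hx hxt
    rw [PySem.Set.mem_ofList, List.mem_filter] at hx
    exact absurd hx.2 (by simpa using hb x hxt)
  · simp only [List.any_eq_true] at hb
    obtain ⟨w, hw, hwin⟩ := hb
    rw [Bool.not_eq_eq_eq_not, Bool.not_true]
    rw [← Bool.not_eq_true, PySem.Set.isdisjoint_iff]
    intro hdis
    exact hdis w (by rw [PySem.Set.mem_ofList, List.mem_filter]; exact ⟨h w hw, hwin⟩) hw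

-- ===== VERDICT =====
set_option maxRecDepth 20000 in
set_option maxHeartbeats 2000000 in
theorem categorize_question_spec : Claim_equal_categorize_question := by
  intro question _
  unfold Spec_categorize_question categorize_question categorize_question_alt
  simp only [pvFlat, pvPick]
  rw [pv_notdisj _ ["born", "birth"] (by decide),
      pv_notdisj _ ["1867", "1961", "1971", "1903", "year", "when"] (by decide),
      pv_notdisj _ ["where", "place"] (by decide),
      pv_notdisj _ ["nobel"] (by decide),
      pv_notdisj _ ["how many"] (by decide),
      pv_notdisj _ ["first", "physics", "1903"] (by decide),
      pv_notdisj _ ["second", "chemistry", "1911"] (by decide),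
      pv_notdisj _ ["2009", "2002", "1903", "1911"] (by decide),
      pv_notdisj _ ["spacex", "space company"] (by decide),
      pv_notdisj _ ["founded", "1903", "2009", "1867", "1971", "2002"] (by decide),
      pv_notdisj _ ["tesla", "electric car"] (by decide),
      pv_notdisj _ ["paypal"] (by decide),
      pv_notdisj _ ["president"] (by decide),
      pv_notdisj _ ["number", "what number", "44"] (by decide),
      pv_notdisj _ ["1903", "1911", "1867", "from"] (by decide),
      pv_notdisj _ ["discover", "element", "polonium", "radium"] (by decide),
      pv_notdisj _ ["married", "wife", "husband", "spouse"] (by decide),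
      pv_notdisj _ ["daughter", "children", "son"] (by decide),
      pv_notdisj _ ["goal", "mars", "colony"] (by decide),
      pv_notdisj _ ["university", "school", "harvard", "study"] (by decide),
      pv_notdisj _ ["move", "immigrat", "america", "united states", "us"] (by decide),
      pv_notdisj _ ["award"] (by decide),
      pv_notdisj _ ["die", "death", "pass away"] (by decide)]
  simp only [List.any_cons, List.any_nil, Bool.or_false, Bool.and_true]
  rcases hb1 : (PySem.Str.isIn "born" (PySem.Str.lower question)
      || PySem.Str.isIn "birth" (PySem.Str.lower question)) with _ | _ <;>
  rcases hb2 : PySem.Str.isIn "nobel" (PySem.Str.lower question) with _ | _ <;>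
  rcases hb3 : (PySem.Str.isIn "spacex" (PySem.Str.lower question)
      || PySem.Str.isIn "space company" (PySem.Str.lower question)) with _ | _ <;>
  rcases hb4 : PySem.Str.isIn "president" (PySem.Str.lower question) with _ | _ <;>
    simp only [hb1, hb2, hb3, hb4, Bool.true_and, Bool.false_and, Bool.false_eq_true, eq_self_iff_true, if_true, if_false, reduceIte]
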